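-- pv_equiv track=rewrite | github.com/Ryodayodayo/InfectionSimulation | simulation.py | calculate_death_economic_loss
-- ===== SOURCE A (Python) =====
-- def calculate_death_economic_loss(daily_deaths, total_days):
--     """死亡者による経済損失を計算"""
--     total_loss = 0
--     daily_loss_per_person = 10783  # 一人当たり日額経済損失
--
--     for death_day, deaths_count in enumerate(daily_deaths):
--         # その日に死亡した人数 × 残り日数 × 日額損失
--         remaining_days = total_days - death_day
--         loss_from_this_day = deaths_count * remaining_days * daily_loss_per_person
--         total_loss += loss_from_this_day
--
--     return total_loss
-- ===== SOURCE B (Python) =====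
-- def calculate_death_economic_loss(daily_deaths, total_days):
--     """死亡者による経済損失を計算 — two aggregate passes combined in closed form."""
--     total_deaths = sum(daily_deaths)
--     weighted_index = sum(day * count for day, count in enumerate(daily_deaths))
--     return 10783 * (total_days * total_deaths - weighted_index)
-- ===== Notes on version B (the rewrite author's own statement) =====
-- stated objective: alternative
-- what changed: B replaces the single per-element accumulation of count*(total_days-day)*10783 with two separate aggregate passes (sum of deaths and index-weighted sum) combined algebraically in one closed-form expression.
import Mathlib
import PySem

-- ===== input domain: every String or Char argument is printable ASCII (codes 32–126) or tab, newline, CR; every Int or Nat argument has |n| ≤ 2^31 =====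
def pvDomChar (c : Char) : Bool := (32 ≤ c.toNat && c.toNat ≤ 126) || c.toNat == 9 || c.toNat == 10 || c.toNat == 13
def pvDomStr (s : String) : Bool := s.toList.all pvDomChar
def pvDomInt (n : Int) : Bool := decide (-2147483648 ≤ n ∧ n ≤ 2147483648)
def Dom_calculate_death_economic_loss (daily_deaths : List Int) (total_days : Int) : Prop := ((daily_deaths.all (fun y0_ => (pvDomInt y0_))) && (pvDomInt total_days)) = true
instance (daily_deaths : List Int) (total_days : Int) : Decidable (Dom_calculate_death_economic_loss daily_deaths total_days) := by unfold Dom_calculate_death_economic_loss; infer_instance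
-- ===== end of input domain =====

-- B computes the same total by two separate aggregate passes (sum of deaths, index-weighted sum) combined in one closed-form expression (objective: alternative decomposition, same cost).


-- ===== PORT A =====
def calculate_death_economic_loss (daily_deaths : List Int) (total_days : Int) : Int :=
  (PySem.List.enumerate daily_deaths).foldl
    (fun total_loss p =>
      let remaining_days := total_days - p.1
      let loss_from_this_day := p.2 * remaining_days * 10783
      total_loss + loss_from_this_day) 0

-- ===== PORT B =====
def calculate_death_economic_loss_alt (daily_deaths : List Int) (total_days : Int) : Int :=
  let total_deaths := daily_deaths.foldl (· + ·) 0
  let weighted_index := (PySem.List.enumerate daily_deaths).foldl (fun acc p => acc + p.1 * p.2) 0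
  10783 * (total_days * total_deaths - weighted_index)

-- ===== PRECONDITION & SPEC =====
def Spec_calculate_death_economic_loss (daily_deaths : List Int) (total_days : Int) (out : Int) : Prop := out = calculate_death_economic_loss_alt daily_deaths total_days
instance (daily_deaths : List Int) (total_days : Int) (out : Int) : Decidable (Spec_calculate_death_economic_loss daily_deaths total_days out) := by unfold Spec_calculate_death_economic_loss; infer_instance

-- ===== CLAIM (what is proved, stated in full; the proofs are below) =====
def Claim_equal_calculate_death_economic_loss : Prop := ∀ (daily_deaths : List Int) (total_days : Int), Dom_calculate_death_economic_loss daily_deaths total_days → Spec_calculate_death_economic_loss daily_deaths total_days (calculate_death_economic_loss daily_deaths total_days)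

-- ===== LEMMAS AND PROOFS =====

theorem pv_foldl_add {β : Type} (g : β → Int) (l : List β) (a : Int) :
    l.foldl (fun acc x => acc + g x) a = a + (l.map g).sum := by
  induction l generalizing a with
  | nil => simp
  | cons x xs ih => simp [ih]; ring

theorem pv_sum_split (td : Int) (l : List (Int × Int)) :
    (l.map (fun p => p.2 * (td - p.1) * 10783)).sum
      = 10783 * (td * (l.map (·.2)).sum - (l.map (fun p => p.1 * p.2)).sum) := by
  induction l with
  | nil => simp
  | cons x xs ih => simp [ih]; ring

-- ===== VERDICT (by name: the statement is the Claim_ definition above) =====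
theorem calculate_death_economic_loss_spec : Claim_equal_calculate_death_economic_loss := by
  intro daily_deaths total_days _
  unfold Spec_calculate_death_economic_loss
  unfold calculate_death_economic_loss calculate_death_economic_loss_alt
  simp only []
  rw [pv_foldl_add (fun p : Int × Int => p.2 * (total_days - p.1) * 10783),
      pv_foldl_add (fun x : Int => x),
      pv_foldl_add (fun p : Int × Int => p.1 * p.2),
      pv_sum_split]
  simp [List.map_id']
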